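-- pv_equiv track=rewrite | github.com/lanthe0/Netproject1 | src/_2Dcode.py | _iter_cells
-- ===== SOURCE A (Python) =====
-- def _iter_cells(bounds: tuple[int, int, int, int]):
--     rs, re, cs, ce = bounds
--     for r in range(rs, re):
--         if r % 2 == 1:
--             indices = range(ce - 1, cs - 1, -1)
--         else:
--             indices = range(cs, ce)
--         for c in indices:
--             yield r, c
-- ===== SOURCE B (Python) =====
-- def _iter_cells(bounds: tuple[int, int, int, int]):
--     rs, re, cs, ce = bounds
--     width = max(ce - cs, 0)
--     rows = max(re - rs, 0)
--     for i in range(rows * width):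
--         r = rs + i // width
--         p = i % width
--         yield (r, ce - 1 - p) if r % 2 == 1 else (r, cs + p)
-- ===== Notes on version B (the rewrite author's own statement) =====
-- stated objective: alternative
-- what changed: Replaces the two nested row/column loops (with a per-row direction branch building a reversed range) by one flat loop over rows*width that decodes row and column position arithmetically via divmod, clamping width and rows at 0 so empty bounds yield nothing.
import Mathlib
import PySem

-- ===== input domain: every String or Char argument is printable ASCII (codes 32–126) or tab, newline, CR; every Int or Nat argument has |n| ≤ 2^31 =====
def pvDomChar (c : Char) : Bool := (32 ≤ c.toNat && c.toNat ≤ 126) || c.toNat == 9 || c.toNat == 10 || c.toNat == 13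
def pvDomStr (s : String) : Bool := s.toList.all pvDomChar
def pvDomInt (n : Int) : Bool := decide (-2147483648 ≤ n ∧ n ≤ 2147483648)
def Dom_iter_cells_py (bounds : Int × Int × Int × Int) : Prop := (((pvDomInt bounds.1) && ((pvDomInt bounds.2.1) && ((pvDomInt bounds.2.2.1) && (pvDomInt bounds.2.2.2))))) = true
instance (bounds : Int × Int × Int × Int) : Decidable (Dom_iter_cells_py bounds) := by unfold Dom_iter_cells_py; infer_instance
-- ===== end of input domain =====

-- B replaces the nested row/column snake loops by one flat loop with divmod index
-- decoding (objective: alternative); same asymptotic cost.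

-- ===== PORT A =====
def iter_cells_py (bounds : Int × Int × Int × Int) : List (Int × Int) :=
  let rs := bounds.1
  let re := bounds.2.1
  let cs := bounds.2.2.1
  let ce := bounds.2.2.2
  (PySem.List.pyRange rs re 1).foldl (fun acc r =>
    let indices :=
      if PySem.Int.mod r 2 == 1 then PySem.List.pyRange (ce - 1) (cs - 1) (-1)
      else PySem.List.pyRange cs ce 1
    indices.foldl (fun acc2 c => acc2 ++ [(r, c)]) acc) []

-- ===== PORT B =====
def iter_cells_py_alt (bounds : Int × Int × Int × Int) : List (Int × Int) :=
  let rs := bounds.1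
  let re := bounds.2.1
  let cs := bounds.2.2.1
  let ce := bounds.2.2.2
  let width := max (ce - cs) 0
  let rows := max (re - rs) 0
  (PySem.List.pyRange 0 (rows * width) 1).foldl (fun acc i =>
    let r := rs + PySem.Int.floordiv i width
    let p := PySem.Int.mod i width
    acc ++ [if PySem.Int.mod r 2 == 1 then (r, ce - 1 - p) else (r, cs + p)]) []

-- ===== PRECONDITION & SPEC =====
def Spec_iter_cells_py (bounds : Int × Int × Int × Int) (out : List (Int × Int)) : Prop := out = iter_cells_py_alt bounds
instance (bounds : Int × Int × Int × Int) (out : List (Int × Int)) : Decidable (Spec_iter_cells_py bounds out) := by unfold Spec_iter_cells_py; infer_instance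

-- ===== CLAIM (what is proved, stated in full; the proofs are below) =====
def Claim_equal_iter_cells_py : Prop := ∀ (bounds : Int × Int × Int × Int), Dom_iter_cells_py bounds → Spec_iter_cells_py bounds (iter_cells_py bounds)

-- ===== LEMMAS AND PROOFS =====

-- one snake cell, parametrised by the row value and the position within the row
def pvCell (cs ce r : Int) (p : Nat) : Int × Int :=
  if PySem.Int.mod r 2 == 1 then (r, ce - 1 - (p : Int)) else (r, cs + (p : Int))

-- B's arithmetic decoding of flat index k
def pvDec (rs cs ce : Int) (wn : Nat) (k : Nat) : Int × Int :=
  let r := rs + PySem.Int.floordiv ((k : Nat) : Int) ((wn : Nat) : Int)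
  let p := PySem.Int.mod ((k : Nat) : Int) ((wn : Nat) : Int)
  if PySem.Int.mod r 2 == 1 then (r, ce - 1 - p) else (r, cs + p)

theorem pvDec_eq (rs cs ce : Int) (wn k p : Nat) (hp : p < wn) :
    pvDec rs cs ce wn (k * wn + p) = pvCell cs ce (rs + (k : Int)) p := by
  have hw : 0 < wn := Nat.lt_of_le_of_lt (Nat.zero_le p) hp
  have h1 : PySem.Int.floordiv ((k * wn + p : Nat) : Int) ((wn : Nat) : Int) = (k : Int) := by
    rw [PySem.Int.floordiv_natCast]
    congr 1
    rw [Nat.mul_comm k wn, Nat.mul_add_div hw, Nat.div_eq_of_lt hp]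
    omega
  have h2 : PySem.Int.mod ((k * wn + p : Nat) : Int) ((wn : Nat) : Int) = (p : Int) := by
    rw [PySem.Int.mod_natCast]
    congr 1
    rw [Nat.mul_comm k wn, Nat.mul_add_mod, Nat.mod_eq_of_lt hp]
  simp only [pvDec, pvCell, h1, h2]

theorem pvRow_eq (cs ce r : Int) :
    (if PySem.Int.mod r 2 == 1 then PySem.List.pyRange (ce - 1) (cs - 1) (-1)
     else PySem.List.pyRange cs ce 1).map (fun c => (r, c))
    = (List.range (ce - cs).toNat).map (pvCell cs ce r) := by
  have he : ce - 1 - (cs - 1) = ce - cs := by ring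
  by_cases h : (PySem.Int.mod r 2 == 1) = true
  · rw [if_pos h, PySem.List.pyRange_neg_one, he, List.map_map]
    apply List.map_congr_left
    intro p _
    simp only [Function.comp, pvCell]
    rw [if_pos h]
  · rw [if_neg h, PySem.List.pyRange_one, List.map_map]
    apply List.map_congr_left
    intro p _
    simp only [Function.comp, pvCell]
    rw [if_neg h]

theorem pvCore (rs cs ce : Int) (wn : Nat) : ∀ n : Nat,
    (List.range (n * wn)).map (pvDec rs cs ce wn)
    = (List.range n).flatMap (fun k : Nat => (List.range wn).map (pvCell cs ce (rs + (k : Int)))) := by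
  intro n
  induction n with
  | zero => simp
  | succ n ih =>
    rw [Nat.succ_mul, List.range_add, List.map_append, ih, List.range_succ,
      List.flatMap_append]
    congr 1
    simp only [List.flatMap_cons, List.flatMap_nil, List.append_nil, List.map_map]
    apply List.map_congr_left
    intro p hp
    exact pvDec_eq rs cs ce wn n p (List.mem_range.mp hp)

-- ===== VERDICT (by name: the statement is the Claim_ definition above) =====
theorem iter_cells_py_spec : Claim_equal_iter_cells_py := by
  intro bounds _
  obtain ⟨rs, re, cs, ce⟩ := bounds
  unfold Spec_iter_cells_py
  simp only [iter_cells_py, iter_cells_py_alt]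
  rw [show max (ce - cs) 0 = (((ce - cs).toNat : Nat) : Int) from (Int.ofNat_toNat _).symm,
      show max (re - rs) 0 = (((re - rs).toNat : Nat) : Int) from (Int.ofNat_toNat _).symm,
      ← Int.natCast_mul, PySem.List.pyRange_zero_natCast]
  simp only [PySem.List.foldl_append_singleton_eq_map, PySem.List.foldl_append_eq_flatMap,
    List.nil_append]
  simp only [pvRow_eq]
  rw [PySem.List.pyRange_one, List.flatMap_map, List.map_map]
  have hB : (List.range ((re - rs).toNat * (ce - cs).toNat)).map
      ((fun i => let r := rs + PySem.Int.floordiv i (((ce - cs).toNat : Nat) : Int)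
                 let p := PySem.Int.mod i (((ce - cs).toNat : Nat) : Int)
                 if PySem.Int.mod r 2 == 1 then (r, ce - 1 - p) else (r, cs + p))
        ∘ (fun k : Nat => ((k : Nat) : Int)))
      = (List.range ((re - rs).toNat * (ce - cs).toNat)).map (pvDec rs cs ce (ce - cs).toNat) := by
    apply List.map_congr_left
    intro k _
    rfl
  rw [hB, pvCore rs cs ce (ce - cs).toNat (re - rs).toNat]
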